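-- pv_equiv track=rewrite | github.com/RamananVr/Leetcodepython | arrays_monotonic_stack/1673_Find_the_Most_Competitive_Subsequence.py | mostCompetitive
-- ===== SOURCE A (Python) =====
-- def mostCompetitive(nums, k):
--     """
--     Finds the most competitive subsequence of size k from the given array nums.
--
--     :param nums: List[int] - The input array
--     :param k: int - The size of the desired subsequence
--     :return: List[int] - The most competitive subsequence
--     """
--     stack = []
--     n = len(nums)
--
--     for i, num in enumerate(nums):
--         # While the stack is not empty, the current number is smaller than the top of the stack,
--         # and removing the top of the stack won't prevent us from forming a subsequence of size k
--         while stack and num < stack[-1] and len(stack) + (n - i) > k: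
--             stack.pop()
--
--         # Add the current number to the stack if the stack size is less than k
--         if len(stack) < k:
--             stack.append(num)
--
--     return stack
-- ===== SOURCE B (Python) =====
-- def mostCompetitive(nums, k):
--     """Greedy range-minimum selection: pick each output element as the leftmost
--     minimum of the window that still leaves enough elements for the rest."""
--     n = len(nums)
--     m = min(k, n)
--     res = []
--     start = 0
--     for j in range(m):
--         window = nums[start:n - m + 1 + j]
--         v = min(window)
--         p = window.index(v)
--         res.append(v)
--         start += p + 1
--     return res
-- ===== Notes on version B (the rewrite author's own statement) =====
-- stated objective: alternative
-- what changed: Replaces the monotonic-stack push/pop loop by a greedy range-minimum selection loop that picks each output element as the leftmost minimum of a shrinking window of the input.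
import Mathlib
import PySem

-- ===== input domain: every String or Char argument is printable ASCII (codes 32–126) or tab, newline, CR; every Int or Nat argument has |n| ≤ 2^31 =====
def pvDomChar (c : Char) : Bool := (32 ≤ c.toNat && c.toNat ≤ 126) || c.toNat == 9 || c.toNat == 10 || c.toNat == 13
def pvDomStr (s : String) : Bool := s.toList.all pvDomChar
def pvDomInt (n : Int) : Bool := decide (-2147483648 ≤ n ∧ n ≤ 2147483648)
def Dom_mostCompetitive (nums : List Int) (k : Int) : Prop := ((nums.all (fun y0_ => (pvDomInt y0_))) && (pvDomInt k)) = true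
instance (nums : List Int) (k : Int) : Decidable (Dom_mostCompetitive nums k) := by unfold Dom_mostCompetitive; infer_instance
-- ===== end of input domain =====

-- B replaces A's monotonic-stack loop by a greedy range-minimum selection loop (alternative algorithm, same results).

-- ===== PORT A =====
-- the stack is kept top-first (Python's stack[-1] is the head here); the final result is reversed back to bottom-first order.
-- the inner `while` loop: pop while stack nonempty, num < top, and len(stack) + (n - i) > k
def popR (n k num i : Int) : List Int → List Int
  | [] => []
  | t :: rest =>
      if num < t ∧ ((rest.length : Int) + 1) + (n - i) > k then popR n k num i rest
      else t :: rest

-- the `for i, num in enumerate(nums)` loop, carrying the index i and the stack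
def aGo (n k : Int) : List Int → Int → List Int → List Int
  | [], _, stk => stk
  | num :: xs, i, stk =>
      let st1 := popR n k num i stk
      let st2 := if (st1.length : Int) < k then num :: st1 else st1
      aGo n k xs (i + 1) st2

def mostCompetitive (nums : List Int) (k : Int) : List Int :=
  (aGo (nums.length : Int) k nums 0 []).reverse

-- ===== PORT B =====
-- the `for j in range(m)` loop, carrying the state (res, start); res grows at the back like Python's append
def bLoop (nums : List Int) (n m : Int) (res : List Int) (start j : Int) : List Int :=
  if j < m then
    match PySem.List.min? (PySem.List.slice nums (some start) (some (n - m + 1 + j))) (fun x => x) with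
    | none => res  -- Python's min([]) would raise; unreachable from mostCompetitive_alt (the window is nonempty there)
    | some v =>
      match PySem.List.index? (PySem.List.slice nums (some start) (some (n - m + 1 + j))) v with
      | none => res  -- unreachable: v is a member of the window
      | some p => bLoop nums n m (res ++ [v]) (start + (p : Int) + 1) (j + 1)
  else res
  termination_by (m - j).toNat
  decreasing_by simp_wf; omega

def mostCompetitive_alt (nums : List Int) (k : Int) : List Int :=
  bLoop nums (nums.length : Int) (min k (nums.length : Int)) [] 0 0

-- ===== PRECONDITION & SPEC =====
def Spec_mostCompetitive (nums : List Int) (k : Int) (out : List Int) : Prop := out = mostCompetitive_alt nums k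
instance (nums : List Int) (k : Int) (out : List Int) : Decidable (Spec_mostCompetitive nums k out) := by unfold Spec_mostCompetitive; infer_instance

-- ===== CLAIM (what is proved, stated in full; the proofs are below) =====
def Claim_equal_mostCompetitive : Prop := ∀ (nums : List Int) (k : Int), Dom_mostCompetitive nums k → Spec_mostCompetitive nums k (mostCompetitive nums k)

-- ===== LEMMAS AND PROOFS =====

-- proof-side recursive form of B's loop
def bPick (nums : List Int) (m : Int) : List Int :=
  if m ≤ 0 then []
  else
    match PySem.List.min? (PySem.List.slice nums none (some ((nums.length : Int) - m + 1))) (fun x => x) with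
    | none => []
    | some v =>
      match PySem.List.index? (PySem.List.slice nums none (some ((nums.length : Int) - m + 1))) v with
      | none => []
      | some p => v :: bPick (PySem.List.slice nums (some ((p : Int) + 1)) none) (m - 1)
  termination_by m.toNat
  decreasing_by simp_wf; omega

-- the index-based loop computes res ++ the recursive form on the suffix nums[start:]
lemma bLoop_eq_bPick (nums : List Int) (m : Int) : ∀ (t : Nat) (res : List Int) (start j : Int),
    m - j = (t : Int) → 0 ≤ start → m - j ≤ (nums.length : Int) - start →
    bLoop nums (nums.length : Int) m res start j = res ++ bPick (nums.drop start.toNat) (m - j) := by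
  intro t
  induction t with
  | zero =>
      intro res start j ht h0 hinv
      rw [bLoop, if_neg (by omega), bPick, if_pos (by omega), List.append_nil]
  | succ t ih =>
      intro res start j ht h0 hinv
      have hj : j < m := by omega
      have hrlen : ((nums.drop start.toNat).length : Int) = (nums.length : Int) - start := by
        push_cast [List.length_drop]
        omega
      have hwin : PySem.List.slice nums (some start) (some ((nums.length : Int) - m + 1 + j))
          = PySem.List.slice (nums.drop start.toNat) none
              (some (((nums.drop start.toNat).length : Int) - (m - j) + 1)) := by
        rw [PySem.List.slice_toNat nums (by omega) (by omega),
            PySem.List.slice_to _ (by rw [hrlen]; omega)]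
        congr 1
        omega
      rw [bLoop, if_pos hj, bPick, if_neg (by omega), hwin]
      cases hmin : PySem.List.min? (PySem.List.slice (nums.drop start.toNat) none
          (some (((nums.drop start.toNat).length : Int) - (m - j) + 1))) (fun x => x) with
      | none => simp
      | some v =>
          cases hidx : PySem.List.index? (PySem.List.slice (nums.drop start.toNat) none
              (some (((nums.drop start.toNat).length : Int) - (m - j) + 1))) v with
          | none => simp only [hidx]; simp
          | some p =>
              simp only [hidx]
              -- p is inside the window, which has length (nums.length - start) - (m - j) + 1
              obtain ⟨hpl, -, -⟩ := PySem.List.getElem_of_index?_eq_some hidx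
              have hwl : ((PySem.List.slice (nums.drop start.toNat) none
                  (some (((nums.drop start.toNat).length : Int) - (m - j) + 1))).length : Int)
                    = (nums.length : Int) - start - (m - j) + 1 := by
                rw [PySem.List.slice_to _ (by rw [hrlen]; omega)]
                push_cast [List.length_take, List.length_drop]
                omega
              have hp : (p : Int) ≤ (nums.length : Int) - start - (m - j) := by
                have := hpl
                omega
              have hrec := ih (res ++ [v]) (start + (p : Int) + 1) (j + 1) (by omega) (by omega) (by omega)
              rw [hrec]
              have hdrops : nums.drop (start + (p : Int) + 1).toNat
                  = PySem.List.slice (nums.drop start.toNat) (some ((p : Int) + 1)) none := by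
                rw [PySem.List.slice_from _ (by omega), List.drop_drop]
                congr 1
                omega
              rw [hdrops, show m - j - 1 = m - (j + 1) by ring]
              simp

@[simp] lemma popR_nil (n k num i : Int) : popR n k num i [] = [] := rfl

lemma popR_cons (n k num i t : Int) (rest : List Int) :
    popR n k num i (t :: rest)
      = if num < t ∧ ((rest.length : Int) + 1) + (n - i) > k then popR n k num i rest
        else t :: rest := rfl

@[simp] lemma aGo_nil (n k i : Int) (stk : List Int) : aGo n k [] i stk = stk := rfl

lemma aGo_cons (n k x i : Int) (xs stk : List Int) :
    aGo n k (x :: xs) i stk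
      = aGo n k xs (i + 1)
          (if ((popR n k x i stk).length : Int) < k then x :: popR n k x i stk
           else popR n k x i stk) := rfl

-- the pop phase does nothing when stack + remaining input cannot exceed k
lemma popR_stay (n k num i : Int) (stk : List Int) (h : (stk.length : Int) + (n - i) ≤ k) :
    popR n k num i stk = stk := by
  cases stk with
  | nil => rfl
  | cons t rest =>
      rw [popR_cons, if_neg]
      rintro ⟨-, h2⟩
      simp only [List.length_cons] at h
      push_cast at h
      omega

-- k ≤ 0: the stack stays empty (push needs len < k)
lemma aGo_nonpos (n k : Int) (hk : k ≤ 0) : ∀ (xs : List Int) (i : Int), aGo n k xs i [] = [] := by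
  intro xs
  induction xs with
  | nil => intro i; simp
  | cons x xs ih =>
      intro i
      rw [aGo_cons, popR_nil, if_neg (by simp; omega)]
      exact ih (i + 1)

-- k large enough: nothing ever pops, everything is pushed
lemma aGo_big (n k : Int) : ∀ (xs : List Int) (i : Int) (stk : List Int),
    n - i = (xs.length : Int) → (stk.length : Int) + (n - i) ≤ k → aGo n k xs i stk = xs.reverse ++ stk := by
  intro xs
  induction xs with
  | nil => intro i stk _ _; simp
  | cons x xs ih =>
      intro i stk hrem h
      simp only [List.length_cons] at hrem
      push_cast at hrem
      rw [aGo_cons, popR_stay n k x i stk h, if_pos (by omega)]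
      have := ih (i + 1) (x :: stk) (by omega)
        (by simp only [List.length_cons]; push_cast; omega)
      rw [this]
      simp

lemma popR_shift (n k num i n' i' : Int) (h : n - i = n' - i') (stk : List Int) :
    popR n k num i stk = popR n' k num i' stk := by
  induction stk with
  | nil => rfl
  | cons t rest ih => rw [popR_cons, popR_cons, h, ih]

-- aGo only depends on n - i
lemma aGo_shift (n k n' : Int) : ∀ (xs : List Int) (i i' : Int) (stk : List Int),
    n - i = n' - i' → aGo n k xs i stk = aGo n' k xs i' stk := by
  intro xs
  induction xs with
  | nil => intro i i' stk _; rfl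
  | cons x xs ih =>
      intro i i' stk h
      rw [aGo_cons, aGo_cons, popR_shift n k x i n' i' h]
      exact ih (i + 1) (i' + 1) _ (by omega)

-- processing a concatenation = processing the pieces in turn
lemma aGo_append (n k : Int) : ∀ (as bs : List Int) (i : Int) (stk : List Int),
    aGo n k (as ++ bs) i stk = aGo n k bs (i + as.length) (aGo n k as i stk) := by
  intro as
  induction as with
  | nil => intro bs i stk; simp
  | cons x as ih =>
      intro bs i stk
      rw [List.cons_append, aGo_cons, aGo_cons, ih]
      congr 1
      simp only [List.length_cons]
      push_cast
      ring

lemma popR_subset (n k num i : Int) : ∀ (stk : List Int) (x : Int), x ∈ popR n k num i stk → x ∈ stk := by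
  intro stk
  induction stk with
  | nil => intro x h; exact absurd h (by simp)
  | cons t rest ih =>
      intro x h
      rw [popR_cons] at h
      split_ifs at h with hc
      · exact List.mem_cons_of_mem _ (ih x h)
      · exact h

-- every element of the stack comes from the input or the initial stack
lemma aGo_mem (n k : Int) : ∀ (xs : List Int) (i : Int) (stk : List Int) (x : Int),
    x ∈ aGo n k xs i stk → x ∈ xs ∨ x ∈ stk := by
  intro xs
  induction xs with
  | nil => intro i stk x h; right; simpa using h
  | cons y xs ih =>
      intro i stk x h
      rw [aGo_cons] at h
      rcases ih _ _ _ h with h1 | h1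
      · exact Or.inl (List.mem_cons_of_mem _ h1)
      · split_ifs at h1 with hc
        · rcases List.mem_cons.1 h1 with rfl | h2
          · exact Or.inl List.mem_cons_self
          · exact Or.inr (popR_subset n k y i stk x h2)
        · exact Or.inr (popR_subset n k y i stk x h1)

-- everything on the stack is bigger than num and capacity allows: the whole stack pops
lemma popR_all (n k num i : Int) : ∀ (stk : List Int), (∀ x ∈ stk, num < x) → k ≤ n - i →
    popR n k num i stk = [] := by
  intro stk
  induction stk with
  | nil => intro _ _; rfl
  | cons t rest ih =>
      intro hgt hk
      rw [popR_cons, if_pos]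
      · exact ih (fun x hx => hgt x (List.mem_cons_of_mem _ hx)) hk
      · exact ⟨hgt t List.mem_cons_self, by omega⟩

-- a protected bottom element b passes through the pop phase untouched
lemma popR_snoc (n k num i b : Int) (hb : n - i ≥ k → b ≤ num) : ∀ (stk : List Int),
    popR n k num i (stk ++ [b]) = popR n (k - 1) num i stk ++ [b] := by
  intro stk
  induction stk with
  | nil =>
      simp only [List.nil_append, popR_nil]
      rw [popR_cons, if_neg]
      rintro ⟨h1, h2⟩
      simp only [List.length_nil] at h2
      rcases le_or_gt k (n - i) with hle | hgt
      · exact absurd h1 (not_lt.2 (hb hle))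
      · omega
  | cons t rest ih =>
      rw [List.cons_append, popR_cons, popR_cons]
      by_cases hc : num < t ∧ ((rest.length : Int) + 1) + (n - i) > k - 1
      · rw [if_pos, if_pos hc, ih]
        obtain ⟨h1, h2⟩ := hc
        refine ⟨h1, ?_⟩
        simp only [List.length_append, List.length_cons, List.length_nil]
        push_cast
        omega
      · rw [if_neg, if_neg hc, List.cons_append]
        intro hcontra
        apply hc
        obtain ⟨h1, h2⟩ := hcontra
        refine ⟨h1, ?_⟩
        simp only [List.length_append, List.length_cons, List.length_nil] at h2
        push_cast at h2 ⊢
        omega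

-- bisimulation: a protected bottom element b stays at the bottom, the rest runs with threshold k - 1
lemma aGo_snoc (n k b : Int) : ∀ (xs : List Int) (i : Int) (stk : List Int),
    (∀ (j : ℕ) (x : Int), xs[j]? = some x → n - (i + j) ≥ k → b ≤ x) →
    aGo n k xs i (stk ++ [b]) = aGo n (k - 1) xs i stk ++ [b] := by
  intro xs
  induction xs with
  | nil => intro i stk _; simp
  | cons x xs ih =>
      intro i stk H
      have hb : n - i ≥ k → b ≤ x := by
        intro hge
        exact H 0 x (by simp) (by simpa using hge)
      rw [aGo_cons, aGo_cons, popR_snoc n k x i b hb stk]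
      have Hnext : ∀ (j : ℕ) (y : Int), xs[j]? = some y → n - ((i + 1) + j) ≥ k → b ≤ y := by
        intro j y hj hge
        refine H (j + 1) y (by simpa using hj) ?_
        push_cast at hge ⊢
        omega
      by_cases hc : ((popR n (k - 1) x i stk).length : Int) < k - 1
      · rw [if_pos, if_pos hc, ← List.cons_append, ih _ _ Hnext]
        simp only [List.length_append, List.length_cons, List.length_nil]
        push_cast
        omega
      · rw [if_neg, if_neg hc, ih _ _ Hnext]
        simp only [List.length_append, List.length_cons, List.length_nil]
        push_cast at hc ⊢
        omega

-- the greedy decomposition of the stack algorithm: the first output element is the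
-- leftmost minimum v (at index p) of the first window, the rest is the run on the suffix
lemma A_decomp (l : List Int) (k v : Int) (p : Nat)
    (hk1 : 1 ≤ k)
    (hpw : (p : Int) + k ≤ l.length)
    (hv : l[p]? = some v)
    (hbefore : ∀ (j : ℕ), j < p → ∀ x, l[j]? = some x → v < x)
    (hwin : ∀ (j : ℕ) (x : Int), l[j]? = some x → (j : Int) + k ≤ l.length → v ≤ x) :
    (aGo (l.length : Int) k l 0 []).reverse
      = v :: (aGo ((l.drop (p + 1)).length : Int) (k - 1) (l.drop (p + 1)) 0 []).reverse := by
  have hp : p < l.length := by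
    rcases List.getElem?_eq_some_iff.1 hv with ⟨h, -⟩
    exact h
  have hvp : l[p] = v := by
    rcases List.getElem?_eq_some_iff.1 hv with ⟨h1, h2⟩
    exact h2
  have hsplit : l = l.take p ++ (v :: l.drop (p + 1)) := by
    conv_lhs => rw [← List.take_append_drop p l]
    rw [List.drop_eq_getElem_cons hp, hvp]
  have htk : ((l.take p).length : Int) = p := by
    simp [List.length_take, Nat.min_eq_left (le_of_lt hp)]
  have hmemS : ∀ x ∈ aGo (l.length : Int) k (l.take p) 0 [], v < x := by
    intro x hx
    rcases aGo_mem _ _ _ _ _ _ hx with h1 | h1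
    · rcases List.mem_iff_getElem.1 h1 with ⟨j, hj, hjx⟩
      have hjp : j < p := by
        simp only [List.length_take] at hj
        omega
      have hjl : l[j]? = some x := by
        rw [List.getElem?_eq_some_iff]
        exact ⟨lt_trans hjp hp, by rw [← hjx, List.getElem_take]⟩
      exact hbefore j hjp x hjl
    · simp at h1
  conv_lhs => rw [hsplit]
  rw [show ((l.take p ++ v :: l.drop (p + 1)).length : Int) = (l.length : Int) by rw [← hsplit]]
  rw [aGo_append, aGo_cons]
  have hpop := popR_all (l.length : Int) k v (0 + ((l.take p).length : Int))
      (aGo (l.length : Int) k (l.take p) 0 []) hmemS (by rw [zero_add, htk]; omega)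
  rw [hpop]
  rw [if_pos (by simp only [List.length_nil, Int.natCast_zero]; omega)]
  rw [show (v :: ([] : List Int)) = ([] : List Int) ++ [v] from rfl]
  have HH : ∀ (j : ℕ) (x : Int), (l.drop (p + 1))[j]? = some x →
      (l.length : Int) - ((0 + ((l.take p).length : Int) + 1) + j) ≥ k → v ≤ x := by
    intro j x hj hge
    rw [zero_add, htk] at hge
    refine hwin (p + 1 + j) x ?_ ?_
    · rw [← hj, List.getElem?_drop]
    · push_cast at hge ⊢
      omega
  rw [aGo_snoc (l.length : Int) k v (l.drop (p + 1)) (0 + ((l.take p).length : Int) + 1) [] HH]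
  rw [aGo_shift (l.length : Int) (k - 1) ((l.drop (p + 1)).length : Int)
        (l.drop (p + 1)) (0 + ((l.take p).length : Int) + 1) 0 []
        (by rw [zero_add, htk]; push_cast [List.length_drop]; omega)]
  simp

-- the two algorithms agree for 0 ≤ k ≤ len, by induction on k
lemma core : ∀ (m : Nat) (l : List Int) (kk : Int), kk = (m : Int) → kk ≤ (l.length : Int) →
    (aGo (l.length : Int) kk l 0 []).reverse = bPick l kk := by
  intro m
  induction m with
  | zero =>
      intro l kk hkk _
      rw [aGo_nonpos _ _ (by omega), bPick, if_pos (by omega)]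
      rfl
  | succ m ih =>
      intro l kk hkk hlen
      have hk1 : 1 ≤ kk := by omega
      set wl : Int := (l.length : Int) - kk + 1 with hwl
      have hwl1 : 1 ≤ wl := by omega
      set w := PySem.List.slice l none (some wl) with hw
      have hwt : w = l.take wl.toNat := PySem.List.slice_to l (by omega)
      have htlen : wl.toNat ≤ l.length := by omega
      have hwlen : w.length = wl.toNat := by
        rw [hwt, List.length_take, Nat.min_eq_left htlen]
      have hwne : w ≠ [] := by
        intro hcon
        rw [hcon] at hwlen
        simp only [List.length_nil] at hwlen
        omega
      obtain ⟨v, hmin⟩ : ∃ v, PySem.List.min? w (fun x => x) = some v := by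
        cases hm : PySem.List.min? w (fun x => x) with
        | none => exact absurd ((PySem.List.min?_eq_none_iff w _).1 hm) hwne
        | some v => exact ⟨v, rfl⟩
      have hvmem : v ∈ w := PySem.List.min?_mem hmin
      have hvmin : ∀ y ∈ w, v ≤ y := fun y hy => PySem.List.min?_isMin hmin y hy
      obtain ⟨p, hidx⟩ : ∃ p, PySem.List.index? w v = some p := by
        cases hm : PySem.List.index? w v with
        | none => exact absurd hvmem ((PySem.List.index?_eq_none_iff w v).1 hm)
        | some p => exact ⟨p, rfl⟩
      obtain ⟨hpw, hwp, hprev⟩ := PySem.List.getElem_of_index?_eq_some hidx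
      have hpt : p < wl.toNat := by rw [← hwlen]; exact hpw
      have hlp : l[p]? = some v := by
        have hq : w[p]? = some v := List.getElem?_eq_some_iff.2 ⟨hpw, hwp⟩
        rw [hwt, List.getElem?_take_of_lt hpt] at hq
        exact hq
      have hA := A_decomp l kk v p hk1 (by omega) hlp ?hbefore ?hwin
      case hbefore =>
        intro j hj x hx
        have hjt : j < wl.toNat := lt_trans hj hpt
        have hq : w[j]? = some x := by
          rw [hwt, List.getElem?_take_of_lt hjt]
          exact hx
        obtain ⟨hjw, hwjx⟩ := List.getElem?_eq_some_iff.1 hq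
        have hle : v ≤ x := by
          rw [← hwjx]
          exact hvmin _ (List.getElem_mem _)
        have hne : x ≠ v := by
          intro hcon
          exact hprev j hj (by rw [hwjx, hcon])
        exact lt_of_le_of_ne hle (Ne.symm hne)
      case hwin =>
        intro j x hx hjk
        have hjt : j < wl.toNat := by omega
        have hq : w[j]? = some x := by
          rw [hwt, List.getElem?_take_of_lt hjt]
          exact hx
        obtain ⟨hjw, hwjx⟩ := List.getElem?_eq_some_iff.1 hq
        rw [← hwjx]
        exact hvmin _ (List.getElem_mem _)
      rw [hA]
      -- B side: unfold one step of bPick and rewrite the two matches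
      rw [bPick, if_neg (by omega)]
      rw [← hwl, ← hw]
      simp only [hmin, hidx]
      have hdrop : PySem.List.slice l (some ((p : Int) + 1)) none = l.drop (p + 1) := by
        rw [PySem.List.slice_from l (by omega), show ((p : Int) + 1).toNat = p + 1 by omega]
      rw [hdrop]
      congr 1
      exact ih (l.drop (p + 1)) (kk - 1) (by omega)
        (by push_cast [List.length_drop]; omega)

-- ===== VERDICT (by name: the statement is the Claim_ definition above) =====
theorem mostCompetitive_spec : Claim_equal_mostCompetitive := by
  intro nums k _
  unfold Spec_mostCompetitive mostCompetitive mostCompetitive_alt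
  rcases le_or_gt k (nums.length : Int) with hk | hk
  · rw [min_eq_left hk]
    rcases le_or_gt 0 k with h0 | h0
    · rw [bLoop_eq_bPick nums k k.toNat [] 0 0 (by omega) le_rfl (by omega)]
      simp only [List.nil_append, Int.toNat_zero, List.drop_zero, sub_zero]
      exact core k.toNat nums k (by omega) hk
    · rw [aGo_nonpos _ _ (by omega), bLoop, if_neg (by omega)]
      rfl
  · rw [min_eq_right (le_of_lt hk)]
    rw [bLoop_eq_bPick nums (nums.length : Int) nums.length [] 0 0 (by omega) le_rfl (by omega)]
    simp only [List.nil_append, Int.toNat_zero, List.drop_zero, sub_zero]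
    have h2 := core nums.length nums (nums.length : Int) rfl le_rfl
    have h1 : aGo (nums.length : Int) k nums 0 [] = nums.reverse ++ [] :=
      aGo_big _ _ nums 0 [] (by omega) (by simp; omega)
    have h3 : aGo (nums.length : Int) (nums.length : Int) nums 0 [] = nums.reverse ++ [] :=
      aGo_big _ _ nums 0 [] (by omega) (by simp)
    rw [h1]
    rw [h3] at h2
    exact h2
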